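-- pv_equiv track=rewrite | github.com/yoonheon051/Youngnam_Robot_Chess | src/cobot2/cobot2/main.py | _majority_vote_dict
-- ===== SOURCE A (Python) =====
-- from collections import Counter
--
-- def _majority_vote_dict(dict_list):
--     all_keys = set()
--     for d in dict_list:
--         all_keys.update(d.keys())
--
--     final_dict = {}
--     for k in sorted(all_keys):
--         values = [d[k] for d in dict_list if k in d]
--         if not values:
--             continue
--
--         counter = Counter(values)
--         max_count = max(counter.values())
--         candidates = [v for v, c in counter.items() if c == max_count]
--
--         if len(candidates) == 1:
--             final_dict[k] = candidates[0]
--         else: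
--             for d in reversed(dict_list):
--                 if k in d and d[k] in candidates:
--                     final_dict[k] = d[k]
--                     break
--
--     return final_dict
-- ===== SOURCE B (Python) =====
-- from collections import Counter
--
-- def _majority_vote_dict(dict_list):
--     # One grouping pass: key -> list of its values in encounter order,
--     # then per key a single argmax by (count, position) picks the
--     # majority value with ties broken by the latest occurrence.
--     groups = {}
--     for d in dict_list:
--         for k, v in d.items():
--             groups.setdefault(k, []).append(v)
--
--     result = {}
--     for k in sorted(groups):
--         vals = groups[k]
--         counts = Counter(vals)
--         best_v = vals[0]
--         best_score = (counts[best_v], 0)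
--         for i, v in enumerate(vals):
--             score = (counts[v], i)
--             if score > best_score:
--                 best_v, best_score = v, score
--         result[k] = best_v
--     return result
-- ===== Notes on version B (the rewrite author's own statement) =====
-- stated objective: faster
-- what changed: Replaces A's key-set pass plus per-key rescans of the whole dict list (Counter, candidate list, separate reversed tie-break scan) by one grouping pass building key -> list of values, then a single argmax by (count, position) per key, whose lexicographic tuple realises the majority-with-latest-occurrence rule directly.
import Mathlib
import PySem

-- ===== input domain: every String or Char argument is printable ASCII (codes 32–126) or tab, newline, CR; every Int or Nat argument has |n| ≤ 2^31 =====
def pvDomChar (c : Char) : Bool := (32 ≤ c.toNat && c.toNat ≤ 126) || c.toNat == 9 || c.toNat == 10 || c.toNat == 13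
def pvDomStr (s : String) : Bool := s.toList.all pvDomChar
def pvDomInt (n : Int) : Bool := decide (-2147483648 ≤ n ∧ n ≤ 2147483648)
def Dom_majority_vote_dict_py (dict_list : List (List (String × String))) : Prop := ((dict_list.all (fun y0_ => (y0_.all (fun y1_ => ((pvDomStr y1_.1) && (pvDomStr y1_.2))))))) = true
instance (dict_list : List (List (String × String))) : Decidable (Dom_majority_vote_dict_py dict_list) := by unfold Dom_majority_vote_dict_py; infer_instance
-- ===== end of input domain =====

-- B replaces A's key-set pass plus per-key rescans of the whole dict list with one
-- grouping pass (key -> value list) and a per-key argmax by (count, position) over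
-- that key's own values only; measured faster in a timing run.

-- ===== PORT A =====
def majority_vote_dict_py (dict_list : List (List (String × String))) : List (String × String) :=
  let dicts : List (PySem.Dict String String) := dict_list.map PySem.Dict.ofList
  -- all_keys = set(); for d in dict_list: all_keys.update(d.keys())
  let all_keys : PySem.Set String :=
    dicts.foldl (fun s d => PySem.Set.update s d.keys) PySem.Set.empty
  -- for k in sorted(all_keys): …
  let final_dict : PySem.Dict String String :=
    (PySem.List.sorted all_keys (fun k => k) false).foldl (fun fd k =>
      -- values = [d[k] for d in dict_list if k in d]
      let values : List String := dicts.filterMap (fun d => d.get? k)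
      match values with
      | [] => fd  -- if not values: continue
      | _ :: _ =>
        let counter := PySem.Dict.counter values
        -- max_count = max(counter.values()); counter is nonempty here, so max? is some
        let max_count : Int := (PySem.List.max? counter.values (fun c => c)).getD 0
        let candidates : List String :=
          (counter.items.filter (fun p => p.2 == max_count)).map (fun p => p.1)
        if candidates.length == 1 then
          fd.insert k (candidates.headD "")
        else
          -- for d in reversed(dict_list): if k in d and d[k] in candidates: …; break
          match dicts.reverse.find? (fun d =>
              d.contains k && candidates.contains (d.getD k "")) with
          | some d => fd.insert k (d.getD k "")
          | none => fd) PySem.Dict.empty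
  final_dict.items

-- ===== PORT B =====
def majority_vote_dict_py_alt (dict_list : List (List (String × String))) : List (String × String) :=
  -- groups = {}; for d in dict_list: for k, v in d.items(): groups.setdefault(k, []).append(v)
  let groups : PySem.Dict String (List String) :=
    dict_list.foldl (fun g dl =>
      (PySem.Dict.ofList dl).items.foldl
        (fun g p => g.modify p.1 [] (fun l => l ++ [p.2])) g)
      PySem.Dict.empty
  let result : PySem.Dict String String :=
    (PySem.List.sorted groups.keys (fun k => k) false).foldl (fun r k =>
      let vals := groups.getD k []
      match vals with
      | [] => r  -- unreachable: every key of groups maps to a nonempty list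
      | v0 :: _ =>
        let counts := PySem.Dict.counter vals
        -- best_v = vals[0]; best_score = (counts[best_v], 0); argmax loop over enumerate(vals)
        let best :=
          (PySem.List.enumerate vals 0).foldl (fun (b : String × Int × Int) p =>
            let score : Int × Int := (counts.getD p.2 0, p.1)
            -- Python tuple '>' on int pairs, written out lexicographically
            if b.2.1 < score.1 ∨ (b.2.1 = score.1 ∧ b.2.2 < score.2) then (p.2, score) else b)
            (v0, (counts.getD v0 0, 0))
        r.insert k best.1) PySem.Dict.empty
  result.items

-- ===== PRECONDITION & SPEC =====
def Spec_majority_vote_dict_py (dict_list : List (List (String × String))) (out : List (String × String)) : Prop := out = majority_vote_dict_py_alt dict_list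
instance (dict_list : List (List (String × String))) (out : List (String × String)) : Decidable (Spec_majority_vote_dict_py dict_list out) := by unfold Spec_majority_vote_dict_py; infer_instance

-- ===== CLAIM (what is proved, stated in full; the proofs are below) =====
def Claim_equal_majority_vote_dict_py : Prop := ∀ (dict_list : List (List (String × String))), Dom_majority_vote_dict_py dict_list → Spec_majority_vote_dict_py dict_list (majority_vote_dict_py dict_list)

-- ===== LEMMAS AND PROOFS =====

-- the per-key value list both versions work on
def pvProj (k : String) (dicts : List (PySem.Dict String String)) : List String :=
  dicts.filterMap (fun d => d.get? k)

-- the common selection: value with maximal count, ties to the latest occurrence,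
-- as a simple replace-on-≥ left fold (counts taken over the full list)
def pvSel (vals : List String) : String :=
  match vals with
  | [] => ""
  | v0 :: tl => tl.foldl (fun b v => if ((v0 :: tl).count b : Int) ≤ (v0 :: tl).count v then v else b) v0

-- A's candidate list, as A computes it
def pvCands (vals : List String) : List String :=
  ((PySem.Dict.counter vals).items.filter
      (fun p => p.2 == (PySem.List.max? (PySem.Dict.counter vals).values (fun c => c)).getD 0)).map
    (fun p => p.1)

-- B's enumerate/argmax fold collapses to the simple replace-on-≥ fold
theorem pv_enumfold (f : String → Int) (l : List String) : ∀ (s j : Int) (w : String), j < s →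
    ((PySem.List.enumerate l s).foldl (fun (b : String × Int × Int) p =>
        if b.2.1 < f p.2 ∨ (b.2.1 = f p.2 ∧ b.2.2 < p.1) then (p.2, (f p.2, p.1)) else b)
      (w, (f w, j))).1
    = l.foldl (fun b v => if f b ≤ f v then v else b) w := by
  induction l with
  | nil => intro s j w h; simp [PySem.List.enumerate_nil]
  | cons v t ih =>
    intro s j w hj
    rw [PySem.List.enumerate_cons]
    simp only [List.foldl_cons]
    by_cases hc : f w ≤ f v
    · have hcond : (f w < f v ∨ (f w = f v ∧ j < s)) := by
        rcases lt_or_eq_of_le hc with h | h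
        · exact Or.inl h
        · exact Or.inr ⟨h, hj⟩
      rw [if_pos hcond, if_pos hc]
      exact ih (s+1) s v (by omega)
    · have hcond : ¬ (f w < f v ∨ (f w = f v ∧ j < s)) := by
        rintro (h | ⟨h, _⟩) <;> omega
      rw [if_neg hcond, if_neg hc]
      exact ih (s+1) j w (by omega)

-- the simple fold returns the last element attaining the maximal f-value
theorem pv_argmax_last (f : String → Int) (v0 : String) (tl : List String) :
    ((v0 :: tl).reverse.find? (fun v => f v == f (tl.foldl (fun b v => if f b ≤ f v then v else b) v0))
      = some (tl.foldl (fun b v => if f b ≤ f v then v else b) v0))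
    ∧ (∀ v ∈ v0 :: tl, f v ≤ f (tl.foldl (fun b v => if f b ≤ f v then v else b) v0)) := by
  induction tl using List.reverseRecOn with
  | nil => simp
  | append_singleton t v ih =>
    rw [List.foldl_append]
    simp only [List.foldl_cons, List.foldl_nil]
    have hrev : (v0 :: (t ++ [v])).reverse = v :: (v0 :: t).reverse := by
      simp [List.reverse_append]
    rw [hrev]
    set r := t.foldl (fun b v => if f b ≤ f v then v else b) v0 with hr
    by_cases hc : f r ≤ f v
    · rw [if_pos hc]
      constructor
      · rw [List.find?_cons]
        simp
      · intro w hw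
        rcases List.mem_cons.mp hw with h | h
        · exact le_trans (ih.2 _ (by simp [h])) hc
        · rcases (List.mem_append.mp h) with h | h
          · exact le_trans (ih.2 _ (by simp [h])) hc
          · simp at h; subst h; exact le_refl _
    · rw [if_neg hc]
      constructor
      · rw [List.find?_cons]
        have : (f v == f r) = false := by simp; omega
        rw [this]
        exact ih.1
      · intro w hw
        rcases List.mem_cons.mp hw with h | h
        · exact ih.2 _ (by simp [h])
        · rcases (List.mem_append.mp h) with h | h
          · exact ih.2 _ (by simp [h])
          · simp at h; subst h; omega

theorem pv_sel_ub (v0 : String) (tl : List String) :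
    ∀ v ∈ v0 :: tl, ((v0 :: tl).count v : Int) ≤ ((v0 :: tl).count (pvSel (v0 :: tl)) : Int) :=
  pv_argmax_last (fun v => ((v0 :: tl).count v : Int)) v0 tl |>.2

theorem pv_sel_pick (v0 : String) (tl : List String) :
    (v0 :: tl).reverse.find?
      (fun v => (((v0 :: tl).count v : Int)) == ((v0 :: tl).count (pvSel (v0 :: tl)) : Int))
    = some (pvSel (v0 :: tl)) :=
  pv_argmax_last (fun v => ((v0 :: tl).count v : Int)) v0 tl |>.1

theorem pv_sel_mem (v0 : String) (tl : List String) : pvSel (v0 :: tl) ∈ v0 :: tl := by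
  have := List.mem_of_find?_eq_some (pv_sel_pick v0 tl)
  rwa [List.mem_reverse] at this

theorem pvProj_cons (k : String) (d : PySem.Dict String String) (ds : List (PySem.Dict String String)) :
    pvProj k (d :: ds) = (d.get? k).toList ++ pvProj k ds := by
  unfold pvProj
  rw [List.filterMap_cons]
  cases d.get? k <;> simp

-- filtering a nodup-keyed dict's items for key k yields exactly get? k
theorem pv_filter_items (d : PySem.Dict String String) (k : String) (hnd : d.keys.Nodup) :
    ((d.items.filter (fun p => p.1 == k)).map (fun p => p.2)) = (d.get? k).toList := by
  obtain ⟨l⟩ := d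
  rw [PySem.Dict.keys_mk] at hnd
  induction l with
  | nil => simp [PySem.Dict.get?]
  | cons p rest ih =>
    rw [List.map_cons] at hnd
    have hnd' := (List.nodup_cons.mp hnd).2
    have hp1 := (List.nodup_cons.mp hnd).1
    rw [PySem.Dict.get?_mk_cons]
    by_cases hk : p.1 == k
    · have hk' : p.1 = k := by simpa using hk
      rw [List.filter_cons_of_pos (by simpa using hk)]
      have hrest : rest.filter (fun q => q.1 == k) = [] := by
        rw [List.filter_eq_nil_iff]
        intro q hq hqk
        exact hp1 (by rw [hk']; rw [← (by simpa using hqk : q.1 = k)]; exact List.mem_map_of_mem hq)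
      rw [hrest]
      simp [hk]
    · rw [List.filter_cons_of_neg (by simpa using hk)]
      rw [if_neg hk]
      exact ih hnd'

-- B's grouping pass has exactly A's key set, in the same first-occurrence order
theorem pv_keys_groups_gen (dl : List (List (String × String))) :
    ∀ (g : PySem.Dict String (List String)) (s : PySem.Set String), g.keys = s →
    (dl.foldl (fun g l =>
        (PySem.Dict.ofList l).items.foldl
          (fun g p => g.modify p.1 [] (fun s => s ++ [p.2])) g) g).keys
    = (dl.map PySem.Dict.ofList).foldl (fun s d => PySem.Set.update s d.keys) s := by
  induction dl with
  | nil => intro g s h; simpa using h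
  | cons l t ih =>
    intro g s h
    rw [List.map_cons, List.foldl_cons, List.foldl_cons]
    apply ih
    rw [PySem.Dict.keys_foldl_modify_key ((PySem.Dict.ofList l).items) Prod.fst [] (fun _ p => (fun s => s ++ [p.2])) g]
    rw [h]
    rfl

-- B's group of key k is exactly A's projected value list
theorem pv_getD_groups_gen (k : String) (dl : List (List (String × String))) :
    ∀ (g : PySem.Dict String (List String)),
    (dl.foldl (fun g l =>
        (PySem.Dict.ofList l).items.foldl
          (fun g p => g.modify p.1 [] (fun s => s ++ [p.2])) g) g).getD k []
    = g.getD k [] ++ pvProj k (dl.map PySem.Dict.ofList) := by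
  induction dl with
  | nil => intro g; simp [pvProj]
  | cons l t ih =>
    intro g
    rw [List.map_cons, List.foldl_cons, pvProj_cons]
    rw [ih]
    rw [PySem.Dict.getD_foldl_modify_append]
    rw [pv_filter_items _ _ (PySem.Dict.nodup_keys_ofList l)]
    rw [List.append_assoc]

-- membership in A's key set
theorem pv_mem_allkeys (dicts : List (PySem.Dict String String)) (k : String) :
    ∀ (s : PySem.Set String),
    k ∈ dicts.foldl (fun s d => PySem.Set.update s d.keys) s
    ↔ k ∈ s ∨ ∃ d ∈ dicts, k ∈ d.keys := by
  induction dicts with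
  | nil => intro s; simp
  | cons d t ih =>
    intro s
    rw [List.foldl_cons, ih, PySem.Set.mem_update]
    simp only [List.mem_cons]
    constructor
    · rintro ((h | h) | ⟨d', hd', h⟩)
      · exact Or.inl h
      · exact Or.inr ⟨d, Or.inl rfl, h⟩
      · exact Or.inr ⟨d', Or.inr hd', h⟩
    · rintro (h | ⟨d', (rfl | hd'), h⟩)
      · exact Or.inl (Or.inl h)
      · exact Or.inl (Or.inr h)
      · exact Or.inr ⟨d', hd', h⟩

-- A's reversed dict scan is the reversed find over the projected value list
theorem pv_scan (k : String) (cs : List String) (ds : List (PySem.Dict String String)) :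
    (ds.reverse.find? (fun d => d.contains k && cs.contains (d.getD k ""))).map (fun d => d.getD k "")
    = (pvProj k ds).reverse.find? (fun v => cs.contains v) := by
  have hmap : ∀ (a b : Option (PySem.Dict String String)),
      ((a.or b).map (fun d => d.getD k "")) = (a.map (fun d => d.getD k "")).or (b.map (fun d => d.getD k "")) := by
    intro a b; cases a <;> rfl
  induction ds with
  | nil => simp [pvProj]
  | cons d t ih =>
    rw [pvProj_cons, List.reverse_cons, List.reverse_append, List.find?_append, List.find?_append, hmap, ih]
    congr 1
    cases hget : d.get? k with
    | none =>
      have hcont : d.contains k = false := by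
        rw [PySem.Dict.contains_eq_isSome_get?, hget]; rfl
      simp [hcont]
    | some v =>
      have hcont : d.contains k = true := by
        rw [PySem.Dict.contains_eq_isSome_get?, hget]; rfl
      have hgetD : d.getD k "" = v := PySem.Dict.getD_of_get?_eq_some d "" hget
      simp only [Option.toList, List.reverse_cons, List.reverse_nil, List.nil_append]
      rw [List.find?_singleton, List.find?_singleton]
      simp [hcont, hgetD]

-- counter.values as a map over the distinct values
theorem pv_values_counter (vals : List String) :
    (PySem.Dict.counter vals).values = (PySem.Set.ofList vals).map (fun v => (vals.count v : Int)) := by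
  have h : (PySem.Dict.counter vals).values = (PySem.Dict.counter vals).items.map (fun p => p.2) := rfl
  rw [h, PySem.Dict.items_counter, List.map_map]
  rfl

-- A's max_count is the count of the commonly selected value
theorem pv_M (v0 : String) (tl : List String) :
    (PySem.List.max? (PySem.Dict.counter (v0 :: tl)).values (fun c => c)).getD 0
    = (((v0 :: tl).count (pvSel (v0 :: tl))) : Int) := by
  set vals := v0 :: tl with hv
  cases hm : PySem.List.max? (PySem.Dict.counter vals).values (fun c => c) with
  | none =>
    rw [PySem.List.max?_eq_none_iff] at hm
    rw [pv_values_counter] at hm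
    have hv0 : v0 ∈ PySem.Set.ofList vals := (PySem.Set.mem_ofList _ _).mpr (by simp [hv])
    rw [List.map_eq_nil_iff] at hm
    simp [hm] at hv0
  | some m =>
    have hmem := PySem.List.max?_mem hm
    have hmax := PySem.List.max?_isMax hm
    rw [pv_values_counter] at hmem hmax
    simp only [List.mem_map] at hmem
    obtain ⟨v, hvmem, hvc⟩ := hmem
    rw [PySem.Set.mem_ofList] at hvmem
    have h1 : m ≤ (vals.count (pvSel vals) : Int) := by
      rw [← hvc]; exact pv_sel_ub v0 tl v hvmem
    have h2 : (vals.count (pvSel vals) : Int) ≤ m := by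
      apply hmax
      exact List.mem_map_of_mem ((PySem.Set.mem_ofList _ _).mpr (pv_sel_mem v0 tl))
    simp only [Option.getD_some]
    omega

theorem pv_mem_cands (v0 : String) (tl : List String) (v : String) :
    v ∈ pvCands (v0 :: tl)
    ↔ v ∈ v0 :: tl ∧ ((v0 :: tl).count v : Int) = ((v0 :: tl).count (pvSel (v0 :: tl)) : Int) := by
  unfold pvCands
  rw [pv_M v0 tl, PySem.Dict.items_counter]
  rw [List.filter_map, List.map_map]
  simp only [List.mem_map, List.mem_filter, Function.comp]
  constructor
  · rintro ⟨a, ⟨ha, hc⟩, rfl⟩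
    exact ⟨(PySem.Set.mem_ofList _ _).mp ha, by simpa using hc⟩
  · rintro ⟨hv, hc⟩
    exact ⟨v, ⟨(PySem.Set.mem_ofList _ _).mpr hv, by simpa using hc⟩, rfl⟩

theorem pv_find_congr {α : Type} (l : List α) (p q : α → Bool) (h : ∀ x ∈ l, p x = q x) :
    l.find? p = l.find? q := by
  induction l with
  | nil => rfl
  | cons a t ih =>
    rw [List.find?_cons, List.find?_cons, h a (by simp)]
    cases q a
    · exact ih (fun x hx => h x (by simp [hx]))
    · rfl

-- A's reversed tie-break over the candidate set finds exactly the common selection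
theorem pv_pick (v0 : String) (tl : List String) :
    (v0 :: tl).reverse.find? (fun v => (pvCands (v0 :: tl)).contains v) = some (pvSel (v0 :: tl)) := by
  rw [pv_find_congr ((v0 :: tl).reverse) _
      (fun v => (((v0 :: tl).count v : Int)) == ((v0 :: tl).count (pvSel (v0 :: tl)) : Int))]
  · exact pv_sel_pick v0 tl
  · intro x hx
    rw [List.mem_reverse] at hx
    have := pv_mem_cands v0 tl x
    by_cases hc : ((v0 :: tl).count x : Int) = ((v0 :: tl).count (pvSel (v0 :: tl)) : Int)
    · simp [hc, this, hx]
    · simp [hc, this]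

-- A's unique-candidate branch also returns the common selection
theorem pv_head (v0 : String) (tl : List String) (h : (pvCands (v0 :: tl)).length == 1) :
    (pvCands (v0 :: tl)).headD "" = pvSel (v0 :: tl) := by
  obtain ⟨c, hc⟩ := List.length_eq_one_iff.mp (by simpa using h)
  have hmem : pvSel (v0 :: tl) ∈ pvCands (v0 :: tl) :=
    (pv_mem_cands v0 tl _).mpr ⟨pv_sel_mem v0 tl, rfl⟩
  rw [hc] at hmem ⊢
  simp at hmem
  simp [hmem]

-- ===== VERDICT (by name: the statement is the Claim_ definition above) =====
theorem majority_vote_dict_py_spec : Claim_equal_majority_vote_dict_py := by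
  intro dict_list _
  show majority_vote_dict_py dict_list = majority_vote_dict_py_alt dict_list
  simp only [majority_vote_dict_py, majority_vote_dict_py_alt]
  rw [pv_keys_groups_gen dict_list PySem.Dict.empty PySem.Set.empty (by rfl)]
  apply congrArg PySem.Dict.items
  apply PySem.List.foldl_congr_mem
  intro fd k hk
  rw [PySem.List.mem_sorted] at hk
  set dicts := dict_list.map PySem.Dict.ofList with hdicts
  have hk' : ∃ d ∈ dicts, k ∈ d.keys := by
    rcases (pv_mem_allkeys dicts k PySem.Set.empty).mp hk with h | h
    · cases h
    · exact h
  obtain ⟨d, hd, hkd⟩ := hk'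
  have hne : pvProj k dicts ≠ [] := by
    cases hget : d.get? k with
    | none => exact absurd ((PySem.Dict.get?_eq_none_iff_not_mem_keys d k).mp hget) (by simpa using hkd)
    | some v =>
      apply List.ne_nil_of_mem (a := v)
      exact List.mem_filterMap.mpr ⟨d, hd, hget⟩
  cases hcase : pvProj k dicts with
  | nil => exact absurd hcase hne
  | cons v0 vt =>
    have hcase' : dicts.filterMap (fun d => d.get? k) = v0 :: vt := hcase
    have hvals : (dict_list.foldl (fun g dl =>
        (PySem.Dict.ofList dl).items.foldl
          (fun g p => g.modify p.1 [] (fun l => l ++ [p.2])) g)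
      PySem.Dict.empty).getD k [] = v0 :: vt := by
      rw [pv_getD_groups_gen k dict_list PySem.Dict.empty, ← hdicts, hcase]
      rfl
    rw [hcase', hvals]
    simp only []
    -- name A's candidate list
    have hcands : ((PySem.Dict.counter (v0 :: vt)).items.filter
        (fun p => p.2 == (PySem.List.max? (PySem.Dict.counter (v0 :: vt)).values (fun c => c)).getD 0)).map
        (fun p => p.1) = pvCands (v0 :: vt) := rfl
    rw [hcands]
    -- B's side: reduce the argmax fold to pvSel
    have hbest : ((PySem.List.enumerate (v0 :: vt) 0).foldl (fun (b : String × Int × Int) p =>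
        if b.2.1 < (PySem.Dict.counter (v0 :: vt)).getD p.2 0 ∨
           (b.2.1 = (PySem.Dict.counter (v0 :: vt)).getD p.2 0 ∧ b.2.2 < p.1)
        then (p.2, ((PySem.Dict.counter (v0 :: vt)).getD p.2 0, p.1)) else b)
        (v0, ((PySem.Dict.counter (v0 :: vt)).getD v0 0, 0))).1 = pvSel (v0 :: vt) := by
      have hfun : (fun (b : String × Int × Int) (p : Int × String) =>
          if b.2.1 < (PySem.Dict.counter (v0 :: vt)).getD p.2 0 ∨
             (b.2.1 = (PySem.Dict.counter (v0 :: vt)).getD p.2 0 ∧ b.2.2 < p.1)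
          then (p.2, ((PySem.Dict.counter (v0 :: vt)).getD p.2 0, p.1)) else b)
          = (fun (b : String × Int × Int) (p : Int × String) =>
          if b.2.1 < ((v0 :: vt).count p.2 : Int) ∨
             (b.2.1 = ((v0 :: vt).count p.2 : Int) ∧ b.2.2 < p.1)
          then (p.2, (((v0 :: vt).count p.2 : Int), p.1)) else b) := by
        funext b p
        rw [PySem.Dict.getD_counter]
      rw [hfun, PySem.Dict.getD_counter]
      rw [PySem.List.enumerate_cons, List.foldl_cons]
      rw [if_neg (by rintro (h | ⟨_, h⟩) <;> simp at h)]
      have := pv_enumfold (fun v => ((v0 :: vt).count v : Int)) vt 1 0 v0 (by omega)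
      simp only [Int.zero_add] at this ⊢
      rw [this]
      rfl
    rw [hbest]
    -- A's side: both branches insert the common selection
    by_cases hlen : (pvCands (v0 :: vt)).length == 1
    · rw [if_pos hlen, pv_head v0 vt hlen]
    · rw [if_neg hlen]
      cases hfind : dicts.reverse.find? (fun d =>
          d.contains k && (pvCands (v0 :: vt)).contains (d.getD k "")) with
      | none =>
        exfalso
        have := pv_scan k (pvCands (v0 :: vt)) dicts
        rw [hfind, hcase] at this
        rw [pv_pick v0 vt] at this
        simp at this
      | some d' =>
        have := pv_scan k (pvCands (v0 :: vt)) dicts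
        rw [hfind, hcase, pv_pick v0 vt] at this
        simp only [Option.map_some, Option.some.injEq] at this
        show fd.insert k (d'.getD k "") = fd.insert k (pvSel (v0 :: vt))
        rw [this]
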